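-- pv_equiv track=rewrite | github.com/aksmf1442/Codesquad-Test | step2.py | rotateR
-- ===== SOURCE A (Python) =====
-- import copy
--
-- def rotateR(cube, di):
--     candidate = copy.deepcopy(cube)
--     length = len(cube)
--     if di == "R":
--         for i in range(length):
--             idx = (i-1)%length
--             candidate[idx][2] = cube[i][2]
--     else:
--         for i in range(length):
--             idx = (i+1)%length
--             candidate[idx][2] = cube[i][2]
--     return candidate
-- ===== SOURCE B (Python) =====
-- import copy
--
-- def rotateR(cube, di):
--     candidate = copy.deepcopy(cube)
--     col = [row[2] for row in cube]
--     rotated = col[1:] + col[:1] if di == "R" else col[-1:] + col[:-1]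
--     for j, v in enumerate(rotated):
--         candidate[j][2] = v
--     return candidate
-- ===== Notes on version B (the rewrite author's own statement) =====
-- stated objective: alternative
-- what changed: Replaces A's modular-index write loop (candidate[(i±1)%n][2] = cube[i][2]) by an extract/rotate/write-back pipeline: pull column 2, rotate it by slicing, write it back in index order.
import Mathlib
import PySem

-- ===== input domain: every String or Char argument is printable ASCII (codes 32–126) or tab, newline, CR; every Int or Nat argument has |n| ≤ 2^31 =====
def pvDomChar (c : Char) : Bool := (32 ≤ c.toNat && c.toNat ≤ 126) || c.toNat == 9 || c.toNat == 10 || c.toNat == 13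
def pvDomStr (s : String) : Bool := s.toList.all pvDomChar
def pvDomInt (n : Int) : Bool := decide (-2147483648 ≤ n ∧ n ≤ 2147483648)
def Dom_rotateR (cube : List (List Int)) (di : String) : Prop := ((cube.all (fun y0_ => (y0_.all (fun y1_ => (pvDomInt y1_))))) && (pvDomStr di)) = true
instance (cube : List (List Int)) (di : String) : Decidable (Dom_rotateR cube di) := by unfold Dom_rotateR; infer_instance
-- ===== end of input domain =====

-- B replaces A's modular-index write loop by an extract/rotate/write-back pipeline (same cost, different decomposition).

-- candidate[idx][2] = v  (shared by both ports; no-op out of range, excluded by Pre_)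
def setCol2 (rows : List (List Int)) (idx : Nat) (v : Int) : List (List Int) :=
  rows.set idx ((rows.getD idx []).set 2 v)

-- ===== PORT A =====
-- idx = (i∓1) % length lies in [0, length) (positive divisor), so .toNat is exact;
-- cube[i][2] is read via getD, exact under Pre_ (every row has ≥ 3 entries, i in range).
def rotateR (cube : List (List Int)) (di : String) : List (List Int) :=
  let length : Int := cube.length
  if di == "R" then
    (PySem.List.pyRange 0 length 1).foldl
      (fun candidate i =>
        setCol2 candidate (PySem.Int.mod (i - 1) length).toNat
          ((cube.getD i.toNat []).getD 2 0)) cube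
  else
    (PySem.List.pyRange 0 length 1).foldl
      (fun candidate i =>
        setCol2 candidate (PySem.Int.mod (i + 1) length).toNat
          ((cube.getD i.toNat []).getD 2 0)) cube

-- ===== PORT B =====
-- col = [row[2] for row in cube]; rotated = col[1:]+col[:1] or col[-1:]+col[:-1];
-- then candidate[j][2] = v for (j, v) in enumerate(rotated).  Enumerate indices are ≥ 0, so .toNat is exact.
def rotateR_alt (cube : List (List Int)) (di : String) : List (List Int) :=
  let col := cube.map (fun row => row.getD 2 0)
  let rotated :=
    if di == "R" then
      PySem.List.slice col (some 1) none ++ PySem.List.slice col none (some 1)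
    else
      PySem.List.slice col (some (-1)) none ++ PySem.List.slice col none (some (-1))
  (PySem.List.enumerate rotated 0).foldl
    (fun candidate p => setCol2 candidate p.1.toNat p.2) cube

-- ===== PRECONDITION & SPEC =====
-- Pre_ excludes exactly the inputs on which the Python A raises IndexError: a cube containing a row with fewer than 3 entries.
def Pre_rotateR (cube : List (List Int)) (di : String) : Prop := ∀ row ∈ cube, 3 ≤ row.length
instance (cube : List (List Int)) (di : String) : Decidable (Pre_rotateR cube di) := by unfold Pre_rotateR; infer_instance

def pvWitness_rotateR : List (List Int) × String := ([[1, 2, 3], [4, 5, 6]], "R")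

def Spec_rotateR (cube : List (List Int)) (di : String) (out : List (List Int)) : Prop := out = rotateR_alt cube di
instance (cube : List (List Int)) (di : String) (out : List (List Int)) : Decidable (Spec_rotateR cube di out) := by unfold Spec_rotateR; infer_instance

-- ===== CLAIM (what is proved, stated in full; the proofs are below) =====
def Claim_equal_rotateR : Prop := ∀ (cube : List (List Int)) (di : String), Dom_rotateR cube di → Pre_rotateR cube di → Spec_rotateR cube di (rotateR cube di)

-- ===== LEMMAS AND PROOFS =====

lemma length_setCol2 (rows : List (List Int)) (idx : Nat) (v : Int) :
    (setCol2 rows idx v).length = rows.length := by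
  simp [setCol2]

lemma getElem?_setCol2 (rows : List (List Int)) (idx : Nat) (v : Int) (j : Nat) :
    (setCol2 rows idx v)[j]? =
      if j = idx then (rows[j]?).map (fun r => r.set 2 v) else rows[j]? := by
  unfold setCol2
  rcases Nat.lt_or_ge idx rows.length with h | h
  · rw [List.getElem?_set]
    by_cases hj : j = idx
    · subst hj; simp [h]
    · simp [hj, Ne.symm hj]
  · rw [List.set_eq_of_length_le (by omega)]
    by_cases hj : j = idx
    · subst hj; simp [List.getElem?_eq_none (by omega : rows.length ≤ j)]
    · simp [hj]

lemma foldl_setCol2_length {ι : Type} (g : ι → Nat) (v : ι → Int) :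
    ∀ (is : List ι) (start : List (List Int)),
      (is.foldl (fun c i => setCol2 c (g i) (v i)) start).length = start.length := by
  intro is
  induction is with
  | nil => intro start; rfl
  | cons h t ih => intro start; simp only [List.foldl_cons]; rw [ih, length_setCol2]

lemma foldl_setCol2_untouched {ι : Type} (g : ι → Nat) (v : ι → Int) :
    ∀ (is : List ι) (start : List (List Int)) (j : Nat),
      (∀ i ∈ is, g i ≠ j) →
      (is.foldl (fun c i => setCol2 c (g i) (v i)) start)[j]? = start[j]? := by
  intro is
  induction is with
  | nil => intro start j _; rfl
  | cons h t ih =>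
      intro start j hj
      simp only [List.foldl_cons]
      rw [ih _ j (fun i hi => hj i (List.mem_cons_of_mem _ hi))]
      rw [getElem?_setCol2]
      simp [Ne.symm (hj h (List.mem_cons_self))]

lemma foldl_setCol2_hit {ι : Type} (g : ι → Nat) (v : ι → Int) :
    ∀ (is : List ι) (start : List (List Int)) (j : Nat) (i₀ : ι),
      i₀ ∈ is → g i₀ = j →
      (∀ i ∈ is, g i = j → i = i₀) →
      is.Nodup →
      (is.foldl (fun c i => setCol2 c (g i) (v i)) start)[j]? =
        start[j]?.map (fun r => r.set 2 (v i₀)) := by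
  intro is
  induction is with
  | nil => intro start j i₀ hmem; exact absurd hmem (List.not_mem_nil)
  | cons h t ih =>
      intro start j i₀ hmem hg huniq hnd
      rcases List.nodup_cons.mp hnd with ⟨hht, hndt⟩
      simp only [List.foldl_cons]
      by_cases hh : h = i₀
      · subst hh
        rw [foldl_setCol2_untouched g v t _ j
          (fun i hi hgi => hht (by rwa [huniq i (List.mem_cons_of_mem _ hi) hgi] at hi))]
        rw [getElem?_setCol2]
        simp [hg]
      · have hi₀t : i₀ ∈ t := by
          rcases List.mem_cons.mp hmem with h' | h'
          · exact absurd h'.symm hh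
          · exact h'
        have hgh : g h ≠ j := fun hgj => hh (huniq h (List.mem_cons_self) hgj)
        rw [ih _ j i₀ hi₀t hg (fun i hi hgi => huniq i (List.mem_cons_of_mem _ hi) hgi) hndt]
        rw [getElem?_setCol2]
        simp [Ne.symm hgh]

lemma nodup_enumerate (xs : List Int) (s : Int) : (PySem.List.enumerate xs s).Nodup :=
  List.Pairwise.imp (fun h => by intro he; subst he; omega)
    (PySem.List.pairwise_lt_enumerate (xs := xs) (s := s))

lemma pymod_idx (x n : Int) (_hn : 0 < n) (hx : -n ≤ x) (hx2 : x < n) :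
    x % n = if x < 0 then x + n else x := by
  split_ifs with h
  · have h2 := Int.add_mul_emod_self_left (a := x + n) (b := n) (c := -1)
    rw [show x + n + n * -1 = x by ring] at h2
    rw [h2]
    exact Int.emod_eq_of_lt (by omega) (by omega)
  · exact Int.emod_eq_of_lt (by omega) hx2

theorem ports_eq (cube : List (List Int)) (di : String) :
    rotateR cube di = rotateR_alt cube di := by
  unfold rotateR rotateR_alt
  have hslice1 : PySem.List.slice (cube.map (fun row => row.getD 2 0)) (some 1) none
      = (cube.map (fun row => row.getD 2 0)).drop 1 := by
    have := PySem.List.slice_from (xs := cube.map (fun row => row.getD 2 0)) (a := 1) (by norm_num)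
    simpa using this
  have hslice2 : PySem.List.slice (cube.map (fun row => row.getD 2 0)) none (some 1)
      = (cube.map (fun row => row.getD 2 0)).take 1 := by
    have := PySem.List.slice_to (xs := cube.map (fun row => row.getD 2 0)) (b := 1) (by norm_num)
    simpa using this
  by_cases hdi : (di == "R") = true
  · simp only [hdi, if_true, hslice1, hslice2]
    set col := cube.map (fun row => row.getD 2 0) with hcol
    have hcollen : col.length = cube.length := by simp [hcol]
    set rot := col.drop 1 ++ col.take 1 with hrot
    apply List.ext_getElem?
    intro j
    have lA := foldl_setCol2_length
      (fun i : Int => (PySem.Int.mod (i - 1) ((cube.length : Nat) : Int)).toNat)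
      (fun i : Int => ((cube.getD i.toNat []).getD 2 0))
      (PySem.List.pyRange 0 ((cube.length : Nat) : Int) 1) cube
    have lB := foldl_setCol2_length
      (fun p : Int × Int => p.1.toNat) (fun p : Int × Int => p.2)
      (PySem.List.enumerate rot 0) cube
    by_cases hj : j < cube.length
    · have hnpos : 0 < cube.length := by omega
      have hrotlen : rot.length = cube.length := by
        simp [hrot, hcollen]; omega
      have hjr : j < rot.length := by omega
      -- A side
      have hAj := foldl_setCol2_hit
        (fun i : Int => (PySem.Int.mod (i - 1) ((cube.length : Nat) : Int)).toNat)
        (fun i : Int => ((cube.getD i.toNat []).getD 2 0))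
        (PySem.List.pyRange 0 ((cube.length : Nat) : Int) 1) cube j
        (if j + 1 = cube.length then (0 : Int) else ((j : Nat) : Int) + 1)
        (by rw [PySem.List.mem_pyRange_one]; split_ifs <;> omega)
        (by
          beta_reduce
          rw [PySem.Int.mod_eq_emod_of_pos (by omega : (0:Int) < ((cube.length : Nat) : Int))]
          rw [pymod_idx _ _ (by omega) (by split_ifs <;> omega) (by split_ifs <;> omega)]
          split_ifs <;> omega)
        (by
          intro i hi hgi
          rw [PySem.List.mem_pyRange_one] at hi
          beta_reduce at hgi
          rw [PySem.Int.mod_eq_emod_of_pos (by omega : (0:Int) < ((cube.length : Nat) : Int))] at hgi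
          rw [pymod_idx _ _ (by omega) (by omega) (by omega)] at hgi
          split_ifs at hgi <;> split_ifs <;> omega)
        (PySem.List.nodup_pyRange_one _ _)
      -- B side
      have hBj := foldl_setCol2_hit
        (fun p : Int × Int => p.1.toNat) (fun p : Int × Int => p.2)
        (PySem.List.enumerate rot 0) cube j
        ((0 : Int) + (j : Nat), rot[j])
        (by rw [PySem.List.mem_enumerate_iff]; exact ⟨j, hjr, rfl⟩)
        (by simp)
        (by
          intro p hp hgp
          rw [PySem.List.mem_enumerate_iff] at hp
          obtain ⟨k, hk, rfl⟩ := hp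
          simp only at hgp
          have : k = j := by omega
          subst this
          rfl)
        (nodup_enumerate _ _)
      rw [hAj, hBj]
      -- values agree
      have hval : rot[j]? =
          some ((cube.getD (if j + 1 = cube.length then (0:Int) else ((j:Nat):Int) + 1).toNat []).getD 2 0) := by
        by_cases hlast : j + 1 = cube.length
        · rw [hrot, List.getElem?_append_right (by simp [hcollen]; omega)]
          have h0 : j - (col.drop 1).length = 0 := by simp [hcollen]; omega
          rw [h0, List.getElem?_take_of_lt (by omega)]
          rw [hcol, List.getElem?_map, List.getElem?_eq_getElem (by omega : 0 < cube.length)]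
          rw [if_pos hlast]
          rw [List.getD_eq_getElem _ _ (by omega : (0:Int).toNat < cube.length)]
          rfl
        · rw [hrot, List.getElem?_append_left (by simp [hcollen]; omega)]
          rw [List.getElem?_drop]
          rw [hcol, List.getElem?_map, List.getElem?_eq_getElem (by omega : 1 + j < cube.length)]
          rw [if_neg hlast]
          have h1 : ((((j:Nat):Int)) + 1).toNat = 1 + j := by omega
          rw [h1, List.getD_eq_getElem _ _ (by omega : 1 + j < cube.length)]
          rfl
      have hv : rot[j] = (cube.getD (if j + 1 = cube.length then (0:Int) else ((j:Nat):Int) + 1).toNat []).getD 2 0 := by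
        have := hval
        rw [List.getElem?_eq_getElem hjr] at this
        exact Option.some.inj this
      beta_reduce
      rw [hv]
    · rw [List.getElem?_eq_none (by rw [lA]; omega), List.getElem?_eq_none (by rw [lB]; omega)]
  · simp only [hdi, if_false, Bool.false_eq_true,
      PySem.List.slice_from_neg_one, PySem.List.slice_to_neg_one, List.dropLast_eq_take]
    set col := cube.map (fun row => row.getD 2 0) with hcol
    have hcollen : col.length = cube.length := by simp [hcol]
    set rot := col.drop (col.length - 1) ++ col.take (col.length - 1) with hrot
    apply List.ext_getElem?
    intro j
    have lA := foldl_setCol2_length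
      (fun i : Int => (PySem.Int.mod (i + 1) ((cube.length : Nat) : Int)).toNat)
      (fun i : Int => ((cube.getD i.toNat []).getD 2 0))
      (PySem.List.pyRange 0 ((cube.length : Nat) : Int) 1) cube
    have lB := foldl_setCol2_length
      (fun p : Int × Int => p.1.toNat) (fun p : Int × Int => p.2)
      (PySem.List.enumerate rot 0) cube
    by_cases hj : j < cube.length
    · have hnpos : 0 < cube.length := by omega
      have hrotlen : rot.length = cube.length := by
        simp [hrot, hcollen]
      have hjr : j < rot.length := by omega
      have hAj := foldl_setCol2_hit
        (fun i : Int => (PySem.Int.mod (i + 1) ((cube.length : Nat) : Int)).toNat)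
        (fun i : Int => ((cube.getD i.toNat []).getD 2 0))
        (PySem.List.pyRange 0 ((cube.length : Nat) : Int) 1) cube j
        (if j = 0 then ((cube.length : Nat) : Int) - 1 else ((j : Nat) : Int) - 1)
        (by rw [PySem.List.mem_pyRange_one]; split_ifs <;> omega)
        (by
          beta_reduce
          rw [PySem.Int.mod_eq_emod_of_pos (by omega : (0:Int) < ((cube.length : Nat) : Int))]
          by_cases h0 : j = 0
          · rw [if_pos h0, show ((cube.length : Nat) : Int) - 1 + 1 = ((cube.length : Nat) : Int) by ring,
              Int.emod_self]
            omega
          · rw [if_neg h0, show ((j : Nat) : Int) - 1 + 1 = ((j : Nat) : Int) by ring,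
              pymod_idx _ _ (by omega) (by omega) (by omega)]
            split_ifs <;> omega)
        (by
          intro i hi hgi
          rw [PySem.List.mem_pyRange_one] at hi
          beta_reduce at hgi
          rw [PySem.Int.mod_eq_emod_of_pos (by omega : (0:Int) < ((cube.length : Nat) : Int))] at hgi
          by_cases hi1 : i + 1 = ((cube.length : Nat) : Int)
          · rw [hi1, Int.emod_self] at hgi
            split_ifs <;> omega
          · rw [pymod_idx _ _ (by omega) (by omega) (by omega)] at hgi
            split_ifs at hgi <;> split_ifs <;> omega)
        (PySem.List.nodup_pyRange_one _ _)
      have hBj := foldl_setCol2_hit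
        (fun p : Int × Int => p.1.toNat) (fun p : Int × Int => p.2)
        (PySem.List.enumerate rot 0) cube j
        ((0 : Int) + (j : Nat), rot[j])
        (by rw [PySem.List.mem_enumerate_iff]; exact ⟨j, hjr, rfl⟩)
        (by simp)
        (by
          intro p hp hgp
          rw [PySem.List.mem_enumerate_iff] at hp
          obtain ⟨k, hk, rfl⟩ := hp
          simp only at hgp
          have : k = j := by omega
          subst this
          rfl)
        (nodup_enumerate _ _)
      rw [hAj, hBj]
      have hval : rot[j]? =
          some ((cube.getD (if j = 0 then ((cube.length : Nat) : Int) - 1 else ((j : Nat) : Int) - 1).toNat []).getD 2 0) := by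
        by_cases h0 : j = 0
        · rw [hrot, List.getElem?_append_left (by simp [hcollen]; omega)]
          rw [List.getElem?_drop]
          rw [hcol, List.getElem?_map,
            List.getElem?_eq_getElem (by simp; omega : (List.map (fun row => row.getD 2 0) cube).length - 1 + j < cube.length)]
          rw [if_pos h0]
          have h1 : (((cube.length : Nat) : Int) - 1).toNat = (cube.map (fun row => row.getD 2 0)).length - 1 + j := by
            simp [h0]
          rw [h1, List.getD_eq_getElem _ _ (by simp; omega : (cube.map (fun row => row.getD 2 0)).length - 1 + j < cube.length)]
          rfl
        · rw [hrot, List.getElem?_append_right (by simp [hcollen]; omega)]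
          rw [List.getElem?_take_of_lt (by simp [hcollen]; omega)]
          rw [hcol, List.getElem?_map,
            List.getElem?_eq_getElem (by simp; omega : j - (List.drop ((List.map (fun row => row.getD 2 0) cube).length - 1) (List.map (fun row => row.getD 2 0) cube)).length < cube.length)]
          rw [if_neg h0]
          have h1 : (((j : Nat) : Int) - 1).toNat
              = j - (List.drop ((List.map (fun row => row.getD 2 0) cube).length - 1) (List.map (fun row => row.getD 2 0) cube)).length := by
            simp; omega
          rw [h1, List.getD_eq_getElem _ _ (by simp; omega : j - (List.drop ((List.map (fun row => row.getD 2 0) cube).length - 1) (List.map (fun row => row.getD 2 0) cube)).length < cube.length)]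
          rfl
      have hv : rot[j] = (cube.getD (if j = 0 then ((cube.length : Nat) : Int) - 1 else ((j : Nat) : Int) - 1).toNat []).getD 2 0 := by
        have := hval
        rw [List.getElem?_eq_getElem hjr] at this
        exact Option.some.inj this
      beta_reduce
      rw [hv]
    · rw [List.getElem?_eq_none (by rw [lA]; omega), List.getElem?_eq_none (by rw [lB]; omega)]

-- ===== VERDICT (by name: the statement is the Claim_ definition above) =====
theorem rotateR_spec : Claim_equal_rotateR := by
  intro cube di _hDom _hPre
  unfold Spec_rotateR
  exact ports_eq cube di
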